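-- pv_equiv track=rewrite | github.com/pawlowiczf/ASD-2022-2023 | Grafy kwiecien 2023/Egzaminy grafy/p3b/egzP3b.py | createEdgesList
-- ===== SOURCE A (Python) =====
-- def createEdgesList(G):
--     #
--     n = len(G)
--     ListOfEdges = []
--     totalSumWeight = 0
--
--     for vertex in range(n):
--         for (neighbour, weight) in G[vertex]:
--             if vertex < neighbour:
--                 ListOfEdges.append( (vertex, neighbour, weight) )
--                 totalSumWeight += weight
--     #end 'for' loops
--
--     return ListOfEdges, totalSumWeight
-- ===== SOURCE B (Python) =====
-- def createEdgesList(G):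
--     # Divide and conquer over the vertex range: solve(lo, hi) returns the
--     # kept edges and their weight sum for vertices in [lo, hi); halves are
--     # combined by concatenation/addition (ranges are disjoint and in order).
--     def solve(lo, hi):
--         if lo >= hi:
--             return [], 0
--         if hi - lo == 1:
--             v = lo
--             edges = [(v, u, w) for (u, w) in G[v] if v < u]
--             return edges, sum(w for _, _, w in edges)
--         mid = (lo + hi) // 2
--         leftE, leftT = solve(lo, mid)
--         rightE, rightT = solve(mid, hi)
--         return leftE + rightE, leftT + rightT
--     return solve(0, len(G))
-- ===== Notes on version B (the rewrite author's own statement) =====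
-- stated objective: alternative
-- what changed: Replaces the single fused left-to-right accumulating loop by a divide-and-conquer recursion over the vertex range: each half is solved independently (base case = one vertex row) and the halves' edge lists and weight totals are merged by concatenation and addition.
import Mathlib
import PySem

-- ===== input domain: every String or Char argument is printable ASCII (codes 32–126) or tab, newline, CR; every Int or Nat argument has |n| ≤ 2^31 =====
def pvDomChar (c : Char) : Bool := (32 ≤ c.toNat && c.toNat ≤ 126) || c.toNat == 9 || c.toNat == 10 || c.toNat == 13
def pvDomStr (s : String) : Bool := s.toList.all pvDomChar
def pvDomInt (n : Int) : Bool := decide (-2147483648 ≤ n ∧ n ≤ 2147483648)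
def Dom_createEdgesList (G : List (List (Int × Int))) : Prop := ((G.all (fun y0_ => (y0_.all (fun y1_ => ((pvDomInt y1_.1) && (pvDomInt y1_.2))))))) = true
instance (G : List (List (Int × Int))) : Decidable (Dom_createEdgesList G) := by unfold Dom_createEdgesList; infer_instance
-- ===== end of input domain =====

-- B replaces A's single fused accumulating loop by a divide-and-conquer recursion over the
-- vertex range, merging half-results by concatenation and addition (alternative decomposition).
-- ===== PORT A =====
def createEdgesList (G : List (List (Int × Int))) : (List (Int × Int × Int)) × Int :=
  let n : Int := (G.length : Int)
  (PySem.List.pyRange 0 n 1).foldl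
    (fun st vertex =>
      (PySem.List.pyGetD G vertex []).foldl
        (fun st2 nw =>
          if vertex < nw.1 then (st2.1 ++ [(vertex, nw.1, nw.2)], st2.2 + nw.2) else st2)
        st)
    ([], 0)

-- ===== PORT B =====
-- solve(lo, hi) of Source B: edges and weight total for vertices in [lo, hi).
-- The Nat argument is only a structural-recursion bound (≥ hi - lo); it never changes the result.
def pvSolveB (G : List (List (Int × Int))) : Nat → Int → Int → (List (Int × Int × Int)) × Int
  | 0, _, _ => ([], 0)
  | fuel + 1, lo, hi =>
    if lo ≥ hi then ([], 0)
    else if hi - lo = 1 then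
      let v := lo
      let edges := (PySem.List.pyGetD G v []).filterMap
        (fun uw => if v < uw.1 then some (v, uw.1, uw.2) else none)
      (edges, (edges.map (fun e => e.2.2)).sum)
    else
      let mid := PySem.Int.floordiv (lo + hi) 2
      let l := pvSolveB G fuel lo mid
      let r := pvSolveB G fuel mid hi
      (l.1 ++ r.1, l.2 + r.2)

def createEdgesList_alt (G : List (List (Int × Int))) : (List (Int × Int × Int)) × Int :=
  pvSolveB G G.length 0 (G.length : Int)

-- ===== PRECONDITION & SPEC =====
def Spec_createEdgesList (G : List (List (Int × Int))) (out : (List (Int × Int × Int)) × Int) : Prop := out = createEdgesList_alt G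
instance (G : List (List (Int × Int))) (out : (List (Int × Int × Int)) × Int) : Decidable (Spec_createEdgesList G out) := by unfold Spec_createEdgesList; infer_instance

-- ===== CLAIM (what is proved, stated in full; the proofs are below) =====
def Claim_equal_createEdgesList : Prop := ∀ (G : List (List (Int × Int))), Dom_createEdgesList G → Spec_createEdgesList G (createEdgesList G)

-- ===== LEMMAS AND PROOFS =====
-- the kept edges of row v
def pvErow (G : List (List (Int × Int))) (v : Int) : List (Int × Int × Int) :=
  (PySem.List.pyGetD G v []).filterMap
    (fun uw => if v < uw.1 then some (v, uw.1, uw.2) else none)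

-- B's recursion computes the flatMap of pvErow over the range, with the weight sum
lemma pvSolveB_eq (G : List (List (Int × Int))) :
    ∀ (fuel : Nat) (lo hi : Int), (hi - lo).toNat ≤ fuel → pvSolveB G fuel lo hi =
      ((PySem.List.pyRange lo hi 1).flatMap (pvErow G),
       (((PySem.List.pyRange lo hi 1).flatMap (pvErow G)).map (fun e => e.2.2)).sum) := by
  intro fuel
  induction fuel with
  | zero =>
    intro lo hi hf
    have h1 : hi ≤ lo := by omega
    simp [pvSolveB, PySem.List.pyRange_one_eq_nil h1]
  | succ fuel ih =>
    intro lo hi hf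
    rw [pvSolveB]
    by_cases h1 : lo ≥ hi
    · simp [h1, PySem.List.pyRange_one_eq_nil h1]
    · by_cases h2 : hi - lo = 1
      · have hhi : hi = lo + 1 := by omega
        simp [hhi, PySem.List.pyRange_one_singleton, pvErow]
      · have hm := PySem.Int.floordiv_two_mid_bounds (lo := lo) (hi := hi) (by omega)
        have he : PySem.Int.floordiv (lo + hi) 2 = (lo + hi) / 2 :=
          PySem.Int.floordiv_eq_ediv_of_pos (by omega)
        set mid := PySem.Int.floordiv (lo + hi) 2 with hmid
        have hl := ih lo mid (by omega)
        have hr := ih mid hi (by omega)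
        simp only [h1, h2, if_neg, not_false_iff]
        rw [hl, hr,
          PySem.List.pyRange_one_append lo mid hi (by omega) (by omega)]
        simp

-- A's inner loop on row v, on an arbitrary accumulator
lemma pvRowStep (v : Int) (row : List (Int × Int)) (es : List (Int × Int × Int)) (t : Int) :
    row.foldl (fun st2 nw => if v < nw.1 then (st2.1 ++ [(v, nw.1, nw.2)], st2.2 + nw.2) else st2) (es, t)
      = (es ++ row.filterMap (fun uw => if v < uw.1 then some (v, uw.1, uw.2) else none),
         t + ((row.filterMap (fun uw => if v < uw.1 then some (v, uw.1, uw.2) else none)).map (fun e => e.2.2)).sum) := by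
  induction row generalizing es t with
  | nil => simp
  | cons h tl ih =>
    by_cases hv : v < h.1
    · simp [List.foldl_cons, hv, ih]; ring
    · simp [List.foldl_cons, hv, ih]

-- A's outer loop over a list of vertex indices, on an arbitrary accumulator
lemma pvOuterStep (G : List (List (Int × Int))) (l : List Int) (es : List (Int × Int × Int)) (t : Int) :
    l.foldl (fun st v => (PySem.List.pyGetD G v []).foldl
        (fun st2 nw => if v < nw.1 then (st2.1 ++ [(v, nw.1, nw.2)], st2.2 + nw.2) else st2) st) (es, t)
      = (es ++ l.flatMap (pvErow G),
         t + ((l.flatMap (pvErow G)).map (fun e => e.2.2)).sum) := by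
  induction l generalizing es t with
  | nil => simp
  | cons h tl ih =>
    simp only [List.foldl_cons, pvRowStep, ih, List.flatMap_cons, List.map_append,
      List.sum_append, List.append_assoc, pvErow]
    ring_nf

-- ===== VERDICT (by name: the statement is the Claim_ definition above) =====
theorem createEdgesList_spec : Claim_equal_createEdgesList := by
  intro G _
  simp only [Spec_createEdgesList, createEdgesList, createEdgesList_alt]
  rw [pvSolveB_eq G G.length 0 (G.length : Int) (by omega), pvOuterStep]
  simp
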